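-- pv_equiv track=rewrite | github.com/thehalleyyoung/deppy | tests/test_equivalence/test_hard_eq_pairs.py | neq49b
-- ===== SOURCE A (Python) =====
-- def neq49b(pairs):
--     """Manual scan that keeps last max."""
--     if not pairs:
--         return None
--     best = pairs[0]
--     for p in pairs[1:]:
--         if p[1] >= best[1]:  # >= means last wins on tie
--             best = p
--     return best
-- ===== SOURCE B (Python) =====
-- def neq49b(pairs):
--     """Stable sort by second value; the last element is the last max."""
--     if not pairs:
--         return None
--     return sorted(pairs, key=lambda p: p[1])[-1]
-- ===== Notes on version B (the rewrite author's own statement) =====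
-- stated objective: alternative
-- what changed: Replaces the manual last-wins linear scan with a stable sort by the second component followed by indexing the last element; stability makes ties resolve to the last occurrence exactly as A's >= scan does.
import Mathlib
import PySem

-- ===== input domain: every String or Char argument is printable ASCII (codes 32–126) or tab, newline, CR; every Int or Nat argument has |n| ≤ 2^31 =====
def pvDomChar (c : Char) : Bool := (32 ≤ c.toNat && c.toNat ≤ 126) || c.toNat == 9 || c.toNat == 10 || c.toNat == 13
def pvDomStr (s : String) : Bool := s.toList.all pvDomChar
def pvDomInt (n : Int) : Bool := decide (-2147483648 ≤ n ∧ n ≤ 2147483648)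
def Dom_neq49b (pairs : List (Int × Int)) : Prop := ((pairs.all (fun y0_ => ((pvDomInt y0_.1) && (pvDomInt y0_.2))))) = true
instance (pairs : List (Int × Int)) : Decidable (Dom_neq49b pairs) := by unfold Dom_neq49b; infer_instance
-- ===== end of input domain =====

-- B replaces A's last-wins linear scan by a stable sort on the second component plus [-1] (alternative decomposition, not faster).

-- ===== PORT A =====
-- manual scan keeping the last maximum (>= means last wins on ties)
def neq49b (pairs : List (Int × Int)) : Option (Int × Int) :=
  match pairs with
  | [] => none
  | b :: t => some (t.foldl (fun best p => if p.2 ≥ best.2 then p else best) b)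

-- ===== PORT B =====
-- sorted(pairs, key=lambda p: p[1])[-1]; [-1] ported as pyGet? (-1)
def neq49b_alt (pairs : List (Int × Int)) : Option (Int × Int) :=
  if pairs.isEmpty then none
  else PySem.List.pyGet? (PySem.List.sorted pairs (fun p => p.2)) (-1)

-- ===== PRECONDITION & SPEC =====
def Spec_neq49b (pairs : List (Int × Int)) (out : Option (Int × Int)) : Prop := out = neq49b_alt pairs
instance (pairs : List (Int × Int)) (out : Option (Int × Int)) : Decidable (Spec_neq49b pairs out) := by unfold Spec_neq49b; infer_instance

-- ===== CLAIM (what is proved, stated in full; the proofs are below) =====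
def Claim_equal_neq49b : Prop := ∀ (pairs : List (Int × Int)), Dom_neq49b pairs → Spec_neq49b pairs (neq49b pairs)

-- ===== LEMMAS AND PROOFS =====

theorem getLast?_cons_ne_nil {α : Type} (x : α) (ys : List α) (h : ys ≠ []) :
    (x :: ys).getLast? = ys.getLast? := by
  cases ys with
  | nil => exact absurd rfl h
  | cons a t => simp [List.getLast?_cons_cons]

theorem pyGet?_neg_one {α : Type} (xs : List α) (h : xs ≠ []) :
    PySem.List.pyGet? xs (-1) = xs.getLast? := by
  have hl : 0 < xs.length := List.length_pos_iff.mpr h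
  simp only [PySem.List.pyGet?, PySem.List.pyIdx?]
  have h1 : ¬ (0 : Int) ≤ -1 := by omega
  have h2 : -(xs.length : Int) ≤ -1 := by omega
  rw [if_neg h1, if_pos h2]
  simp [List.getLast?_eq_getElem?]

-- inserting an element that goes strictly before some member does not change the last element
theorem getLast?_insertBy_of_mem {α : Type} (before : α → α → Bool) (x : α) (ys : List α)
    (h : ∃ y ∈ ys, before x y = true) :
    (PySem.List.insertBy before x ys).getLast? = ys.getLast? := by
  induction ys with
  | nil => rcases h with ⟨y, hy, _⟩; cases hy
  | cons y ys ih =>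
    by_cases hb : before x y = true
    · simp [PySem.List.insertBy, hb]
    · rcases h with ⟨z, hz, hbz⟩
      have hz' : z ∈ ys := by
        rcases List.mem_cons.mp hz with h1 | h1
        · exact absurd (h1 ▸ hbz) hb
        · exact h1
      have hne : PySem.List.insertBy before x ys ≠ [] := by
        cases ys <;> simp [PySem.List.insertBy] <;> split <;> simp
      have hne2 : ys ≠ [] := by intro h0; rw [h0] at hz'; cases hz'
      simp only [PySem.List.insertBy, hb, Bool.false_eq_true, if_false]
      rw [getLast?_cons_ne_nil _ _ hne, getLast?_cons_ne_nil _ _ hne2]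
      exact ih ⟨z, hz', hbz⟩

-- invariant: the running best of A's scan is the last element of the insertion-sort accumulator
theorem fold_last_invariant (t : List (Int × Int)) :
    ∀ (acc : List (Int × Int)) (best : Int × Int),
    acc.getLast? = some best → (∀ y ∈ acc, y.2 ≤ best.2) →
    (t.foldl (fun a x => PySem.List.insertBy (fun a b => decide (a.2 < b.2)) x a) acc).getLast?
      = some (t.foldl (fun best p => if p.2 ≥ best.2 then p else best) best) := by
  induction t with
  | nil => intro acc best h _; simpa using h
  | cons x t ih =>
    intro acc best hlast hbnd
    by_cases hx : x.2 ≥ best.2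
    · have hins : PySem.List.insertBy (fun a b => decide (a.2 < b.2)) x acc = acc ++ [x] := by
        apply PySem.List.insertBy_of_forall_not_before
        intro y hy
        simp only [decide_eq_false_iff_not, not_lt]
        exact le_trans (hbnd y hy) hx
      simp only [List.foldl_cons, hins, if_pos hx]
      apply ih
      · simp
      · intro y hy
        rcases List.mem_append.mp hy with h1 | h1
        · exact le_trans (hbnd y h1) hx
        · simp at h1; simp [h1]
    · have hbmem : best ∈ acc := List.mem_of_getLast? hlast
      have hlast' : (PySem.List.insertBy (fun a b => decide (a.2 < b.2)) x acc).getLast? = some best := by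
        rw [getLast?_insertBy_of_mem _ _ _ ⟨best, hbmem, by simp; omega⟩]; exact hlast
      simp only [List.foldl_cons, if_neg hx]
      apply ih _ _ hlast'
      intro y hy
      rcases (PySem.List.mem_insertBy _ _ _ _).mp hy with h1 | h1
      · subst h1; omega
      · exact hbnd y h1

-- ===== VERDICT (by name: the statement is the Claim_ definition above) =====
theorem neq49b_spec : Claim_equal_neq49b := by
  unfold Claim_equal_neq49b
  intro pairs _
  unfold Spec_neq49b neq49b neq49b_alt
  cases pairs with
  | nil => simp
  | cons b t =>
    have hsort := PySem.List.sorted_eq_foldl_insertBy (b :: t) (fun p : Int × Int => p.2)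
    have hinv := fold_last_invariant t [b] b (by simp) (by simp)
    simp only [List.isEmpty_cons, Bool.false_eq_true, if_false]
    rw [hsort]
    simp only [List.foldl_cons, PySem.List.insertBy] at hinv ⊢
    -- pyGet? at -1 is getLast? on a nonempty list
    have hne : (t.foldl (fun a x => PySem.List.insertBy (fun a b => decide (a.2 < b.2)) x a) [b]) ≠ [] := by
      intro h0; rw [h0] at hinv; simp at hinv
    rw [pyGet?_neg_one _ hne]
    exact hinv.symm
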